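-- pv_equiv track=rewrite | github.com/zetLighter/cp_info | task3(var2).py | task3_2
-- ===== SOURCE A (Python) =====
-- def task3_2(initArray):
--     sumArray = []
--     for i in range(0, len(initArray)):
--         if i == (len(initArray) - 1):
--             sum = initArray[i-1] + initArray[0]
--             sumArray.append(sum)
--         else:
--             sum = initArray[i-1] + initArray[i+1]
--             sumArray.append(sum)
--     return sumArray
-- ===== SOURCE B (Python) =====
-- def task3_2(initArray):
--     prev = initArray[-1:] + initArray[:-1]
--     nxt = initArray[1:] + initArray[:1]
--     return [p + n for p, n in zip(prev, nxt)]
-- ===== Notes on version B (the rewrite author's own statement) =====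
-- stated objective: idiomatic
-- what changed: Replaces the index loop with its last-index wrap branch by building two rotated copies via slicing and summing them element-wise with zip.
import Mathlib
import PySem

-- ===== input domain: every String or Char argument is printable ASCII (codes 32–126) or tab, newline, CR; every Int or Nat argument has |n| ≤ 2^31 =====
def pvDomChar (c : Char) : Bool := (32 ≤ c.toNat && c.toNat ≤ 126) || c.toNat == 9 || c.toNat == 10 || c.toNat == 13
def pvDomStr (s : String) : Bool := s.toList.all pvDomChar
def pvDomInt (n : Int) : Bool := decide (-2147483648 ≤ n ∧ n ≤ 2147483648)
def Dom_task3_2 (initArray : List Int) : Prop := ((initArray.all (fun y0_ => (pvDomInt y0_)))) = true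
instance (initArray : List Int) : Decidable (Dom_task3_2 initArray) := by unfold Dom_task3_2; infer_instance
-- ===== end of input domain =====

-- B builds the two circular rotations with slices and sums them with zip, replacing A's per-index loop with a last-index branch (idiomatic decomposition).


-- ===== PORT A =====
-- literal port: for i in range(len(xs)): branch on i == len-1, append the two-element sum
-- indexing is always in range (i-1 ∈ [-1, len-2], i+1 ≤ len-1), so pyGetD is exact here
def task3_2 (initArray : List Int) : List Int :=
  (PySem.List.pyRange 0 (PySem.List.len initArray) 1).foldl
    (fun sumArray i =>
      if i = PySem.List.len initArray - 1 then
        sumArray ++ [PySem.List.pyGetD initArray (i - 1) 0 + PySem.List.pyGetD initArray 0 0]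
      else
        sumArray ++ [PySem.List.pyGetD initArray (i - 1) 0 + PySem.List.pyGetD initArray (i + 1) 0])
    []

-- ===== PORT B =====
def task3_2_alt (initArray : List Int) : List Int :=
  let prev := PySem.List.slice initArray (some (-1)) none ++ PySem.List.slice initArray none (some (-1))
  let nxt := PySem.List.slice initArray (some 1) none ++ PySem.List.slice initArray none (some 1)
  (prev.zip nxt).map (fun p => p.1 + p.2)

-- ===== PRECONDITION & SPEC =====
def Spec_task3_2 (initArray : List Int) (out : List Int) : Prop := out = task3_2_alt initArray
instance (initArray : List Int) (out : List Int) : Decidable (Spec_task3_2 initArray out) := by unfold Spec_task3_2; infer_instance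

-- ===== CLAIM (what is proved, stated in full; the proofs are below) =====
def Claim_equal_task3_2 : Prop := ∀ (initArray : List Int), Dom_task3_2 initArray → Spec_task3_2 initArray (task3_2 initArray)

-- ===== LEMMAS AND PROOFS =====

theorem task3_2_eq_map (xs : List Int) :
    task3_2 xs = (List.range xs.length).map (fun (k : Nat) =>
      if (k : Int) = (xs.length : Int) - 1 then
        PySem.List.pyGetD xs ((k : Int) - 1) 0 + PySem.List.pyGetD xs 0 0
      else
        PySem.List.pyGetD xs ((k : Int) - 1) 0 + PySem.List.pyGetD xs ((k : Int) + 1) 0) := by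
  unfold task3_2
  have hfun : (fun (sumArray : List Int) (i : Int) =>
      if i = PySem.List.len xs - 1 then
        sumArray ++ [PySem.List.pyGetD xs (i - 1) 0 + PySem.List.pyGetD xs 0 0]
      else
        sumArray ++ [PySem.List.pyGetD xs (i - 1) 0 + PySem.List.pyGetD xs (i + 1) 0])
    = (fun sumArray i => sumArray ++ [if i = PySem.List.len xs - 1 then
        PySem.List.pyGetD xs (i - 1) 0 + PySem.List.pyGetD xs 0 0
      else
        PySem.List.pyGetD xs (i - 1) 0 + PySem.List.pyGetD xs (i + 1) 0]) := by
    funext s i; split_ifs <;> rfl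
  rw [hfun, PySem.List.foldl_append_singleton_eq_map, PySem.List.pyRange_one,
    PySem.List.len_eq]
  simp

theorem task3_2_spec' (xs : List Int) : task3_2 xs = task3_2_alt xs := by
  cases xs with
  | nil => rfl
  | cons y ys =>
    rw [task3_2_eq_map]
    unfold task3_2_alt
    have h1 : PySem.List.slice (y :: ys) none (some 1) = (y :: ys).take 1 := by
      simp [pysem]
    rw [PySem.List.slice_from_neg_one, PySem.List.slice_to_neg_one,
      PySem.List.slice_from_one, h1]
    set xs := y :: ys with hxs
    have hne : xs ≠ [] := by simp [hxs]
    have hlen : 0 < xs.length := by simp [hxs]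
    apply List.ext_getElem
    · simp [List.length_zip]; omega
    · intro k h1 h2
      have hk : k < xs.length := by simpa using h1
      simp only [List.getElem_map, List.getElem_range, List.getElem_zip]
      have hprev : (xs.drop (xs.length - 1) ++ xs.dropLast)[k]'(by
          simp [List.length_append, List.length_drop, List.length_dropLast]; omega)
          = PySem.List.pyGetD xs ((k : Int) - 1) 0 := by
        rcases Nat.eq_zero_or_pos k with hk0 | hk0
        · subst hk0
          rw [List.getElem_append_left (by simp [List.length_drop]; omega)]
          rw [show ((0:Nat):Int) - 1 = -1 from by norm_num,
            PySem.List.pyGetD_neg_ofNat xs 1 0 (by omega) (by omega)]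
          rw [List.getElem_drop]
          simp
        · have hdl : xs.drop (xs.length - 1) = [xs.getLast hne] := by
            rw [List.drop_length_sub_one hne]
          rw [List.getElem_append_right (by simp [List.length_drop]; omega)]
          have : ((k : Int) - 1) = ((k - 1 : Nat) : Int) := by omega
          rw [this, PySem.List.pyGetD_natCast]
          simp only [List.length_drop]
          rw [List.getElem_dropLast]
          rw [List.getD_eq_getElem _ _ (by omega)]
          congr 1
          omega
      have hnxt : (xs.tail ++ xs.take 1)[k]'(by
          simp [List.length_append, List.length_tail, List.length_take]; omega)
          = if (k : Int) = (xs.length : Int) - 1 then PySem.List.pyGetD xs 0 0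
            else PySem.List.pyGetD xs ((k : Int) + 1) 0 := by
        by_cases hklast : k = xs.length - 1
        · rw [if_pos (by omega)]
          rw [List.getElem_append_right (by simp [List.length_tail]; omega)]
          rw [PySem.List.pyGetD_zero]
          simp only [List.length_tail]
          rw [List.getElem_take]
          rw [List.getD_eq_getElem _ _ (by omega)]
          congr 1
          omega
        · rw [if_neg (by omega)]
          rw [List.getElem_append_left (by simp [List.length_tail]; omega)]
          rw [List.getElem_tail]
          have : ((k : Int) + 1) = ((k + 1 : Nat) : Int) := by omega
          rw [this, PySem.List.pyGetD_natCast]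
          rw [List.getD_eq_getElem _ _ (by omega)]
      rw [hprev, hnxt]
      split_ifs <;> ring

-- ===== VERDICT (by name: the statement is the Claim_ definition above) =====
theorem task3_2_spec : Claim_equal_task3_2 := by
  intro xs _
  unfold Spec_task3_2
  exact task3_2_spec' xs
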